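-- pv_equiv track=rewrite | github.com/joshuarhellerman/Regime-Adaptive-Trading-System | dependency_map_generator.py | format_dependency_map
-- ===== SOURCE A (Python) =====
-- from collections import defaultdict
--
-- def format_dependency_map(dependencies):
--     """
--     Format the dependency map as a readable markdown text.
--
--     Args:
--         dependencies: Dict mapping modules to their dependencies
--
--     Returns:
--         str: Formatted dependency map
--     """
--     formatted_map = ""
--
--     # Group by top-level module
--     grouped_modules = defaultdict(list)
--     for module in sorted(dependencies.keys()):
--         parts = module.split('.')
--         if len(parts) > 0:
--             grouped_modules[parts[0]].append(module)
--
--     # Format each group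
--     for group_name, modules in sorted(grouped_modules.items()):
--         formatted_map += f"**{group_name.upper()}:**\n"
--
--         for module in sorted(modules):
--             deps = dependencies[module]
--             formatted_map += f"* **{module}**\n"
--             if deps:
--                 formatted_map += f"   * Depends on: {', '.join(sorted(deps))}\n"
--
--         formatted_map += "\n"
--
--     return formatted_map
-- ===== SOURCE B (Python) =====
-- from itertools import groupby
--
-- def format_dependency_map(dependencies):
--     """
--     Format the dependency map as a readable markdown text.
--     """
--     def top(m):
--         return m.split('.')[0]
--
--     modules = sorted(dependencies.keys(), key=lambda m: (top(m), m))
--     lines = []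
--     for group_name, mods in groupby(modules, key=top):
--         lines.append(f"**{group_name.upper()}:**\n")
--         for module in mods:
--             lines.append(f"* **{module}**\n")
--             deps = dependencies[module]
--             if deps:
--                 lines.append(f"   * Depends on: {', '.join(sorted(deps))}\n")
--         lines.append("\n")
--     return ''.join(lines)
-- ===== Notes on version B (the rewrite author's own statement) =====
-- stated objective: idiomatic
-- what changed: B replaces A's defaultdict grouping pass followed by re-sorting the group items and re-sorting each group's module list with a single lexicographic sort of the keys by (top_level, full_name) and one streaming itertools.groupby pass that emits lines into a list joined at the end.
import Mathlib
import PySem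

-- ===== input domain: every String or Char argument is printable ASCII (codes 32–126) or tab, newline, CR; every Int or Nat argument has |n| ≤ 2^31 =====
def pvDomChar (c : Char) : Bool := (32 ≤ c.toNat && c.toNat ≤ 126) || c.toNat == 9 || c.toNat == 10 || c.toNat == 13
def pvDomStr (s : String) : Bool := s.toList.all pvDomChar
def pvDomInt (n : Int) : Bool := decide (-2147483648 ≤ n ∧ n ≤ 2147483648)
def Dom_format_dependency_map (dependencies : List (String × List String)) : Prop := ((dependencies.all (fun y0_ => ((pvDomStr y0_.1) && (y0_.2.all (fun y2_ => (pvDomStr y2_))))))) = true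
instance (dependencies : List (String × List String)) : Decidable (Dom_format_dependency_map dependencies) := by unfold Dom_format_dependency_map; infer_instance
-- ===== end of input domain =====

-- B is the same formatting done idiomatically: one lexicographic sort of the keys by
-- (top-level part, full name) and one groupby-style pass emitting lines joined at the end,
-- instead of A's defaultdict index plus re-sorts. Equal return value on every input.

-- dependencies[m] under the dict-as-association-list convention: first matching key.
-- (KeyError is impossible where it is used: m always comes from the dict's own keys.)
def pvLookup (dependencies : List (String × List String)) (m : String) : List String :=
  match dependencies.find? (fun p => p.1 == m) with
  | some p => p.2
  | none => []

-- ===== PORT A =====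
def format_dependency_map (dependencies : List (String × List String)) : String :=
  -- grouped_modules[parts[0]].append(module) over sorted(dependencies.keys())
  let keys : List String := PySem.Set.ofList (dependencies.map Prod.fst)
  let grouped : PySem.Dict String (List String) :=
    (PySem.List.sorted keys (fun m => m)).foldl
      (fun d m =>
        let parts := (PySem.Str.split? m ".").getD []   -- '.' is a nonempty separator: split? is `some`
        if 0 < parts.length then d.modify (parts.headD "") [] (fun l => l ++ [m]) else d)
      PySem.Dict.empty
  -- for group_name, modules in sorted(grouped_modules.items()): …
  (PySem.List.sorted2 grouped.items (fun p => p.1) (fun p => p.2)).foldl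
    (fun acc gp =>
      let acc := acc ++ "**" ++ PySem.Str.upper gp.1 ++ ":**\n"
      let acc := (PySem.List.sorted gp.2 (fun m => m)).foldl
        (fun acc m =>
          let acc := acc ++ "* **" ++ m ++ "**\n"
          let deps := pvLookup dependencies m
          if deps ≠ [] then
            acc ++ "   * Depends on: " ++ PySem.Str.join ", " (PySem.List.sorted deps (fun x => x)) ++ "\n"
          else acc)
        acc
      acc ++ "\n")
    ""

-- ===== PORT B =====
-- top(m) = m.split('.')[0]  (split? is `some` and never empty for the nonempty separator '.')
def pvTop (m : String) : String := ((PySem.Str.split? m ".").getD []).headD ""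

-- itertools.groupby(modules, key=top), each group materialised as (key, list of members)
def pvGroups : List String → List (String × List String)
  | [] => []
  | m :: rest =>
    (pvTop m, m :: rest.takeWhile (fun x => pvTop x == pvTop m)) ::
      pvGroups (rest.dropWhile (fun x => pvTop x == pvTop m))
  termination_by l => l.length
  decreasing_by simpa using Nat.lt_succ_of_le (List.length_dropWhile_le _ _)

def format_dependency_map_alt (dependencies : List (String × List String)) : String :=
  let modules := PySem.List.sorted2 (PySem.Set.ofList (dependencies.map Prod.fst)) pvTop (fun m => m)
  let lines := (pvGroups modules).flatMap (fun gp =>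
    ("**" ++ PySem.Str.upper gp.1 ++ ":**\n") ::
    (gp.2.flatMap (fun m =>
      let deps := pvLookup dependencies m
      ("* **" ++ m ++ "**\n") ::
      (if deps ≠ [] then
        ["   * Depends on: " ++ PySem.Str.join ", " (PySem.List.sorted deps (fun x => x)) ++ "\n"]
      else []))
    ++ ["\n"]))
  PySem.Str.join "" lines

-- ===== PRECONDITION & SPEC =====
def Spec_format_dependency_map (dependencies : List (String × List String)) (out : String) : Prop := out = format_dependency_map_alt dependencies
instance (dependencies : List (String × List String)) (out : String) : Decidable (Spec_format_dependency_map dependencies out) := by unfold Spec_format_dependency_map; infer_instance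

-- ===== CLAIM (what is proved, stated in full; the proofs are below) =====
def Claim_equal_format_dependency_map : Prop := ∀ (dependencies : List (String × List String)), Dom_format_dependency_map dependencies → Spec_format_dependency_map dependencies (format_dependency_map dependencies)

-- ===== LEMMAS AND PROOFS =====

-- '.'.split never yields the empty list
theorem pv_splitOn_go_ne_nil (sep : List Char) : ∀ (fuel : Nat) (l cur : List Char) (acc : List (List Char)),
    PySem.Chars.splitOn.go sep fuel l cur acc ≠ [] := by
  intro fuel
  induction fuel with
  | zero => intro l cur acc; simp [PySem.Chars.splitOn.go]
  | succ n ih =>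
    intro l cur acc
    cases l with
    | nil => simp [PySem.Chars.splitOn.go]
    | cons c rest =>
      rw [PySem.Chars.splitOn.go]
      split
      · exact ih _ _ _
      · exact ih _ _ _

theorem pv_parts_ne_nil (s : String) : ((PySem.Str.split? s ".").getD []) ≠ [] := by
  have h := PySem.Str.split?_map s "."
  cases hs : PySem.Str.split? s "." with
  | none =>
    rw [hs] at h
    simp [PySem.Chars.split?] at h
  | some ps =>
    rw [hs] at h
    simp only [Option.map_some] at h
    have : PySem.Chars.split? s.toList ".".toList = some (ps.map String.toList) := h.symm
    simp only [PySem.Chars.split?] at this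
    split at this
    · simp_all
    · have hps : ps.map String.toList = PySem.Chars.splitOn s.toList ".".toList := by
        simpa using this.symm
      intro hnil
      subst hnil
      rw [PySem.Chars.splitOn] at hps
      simp at hps
      exact pv_splitOn_go_ne_nil _ _ _ _ _ hps

-- insertBy facts (for relating sorted2 to sorted)
theorem pv_insertBy_perm {α : Type} (bef : α → α → Bool) (x : α) (ys : List α) :
    (PySem.List.insertBy bef x ys).Perm (x :: ys) := by
  induction ys with
  | nil => simp [PySem.List.insertBy]
  | cons y t ih =>
    rw [PySem.List.insertBy]
    split
    · exact List.Perm.refl _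
    · exact (ih.cons y).trans (List.Perm.swap x y t)

theorem pv_insertBy_congr {α : Type} (bef bef' : α → α → Bool) (x : α) (ys : List α)
    (h : ∀ y ∈ ys, bef x y = bef' x y) :
    PySem.List.insertBy bef x ys = PySem.List.insertBy bef' x ys := by
  induction ys with
  | nil => rfl
  | cons y t ih =>
    rw [PySem.List.insertBy, PySem.List.insertBy, h y (by simp)]
    split
    · rfl
    · rw [ih (fun z hz => h z (by simp [hz]))]

theorem pv_foldl_insertBy_congr {α : Type} (bef bef' : α → α → Bool) :
    ∀ (xs acc : List α),
      (∀ a ∈ acc ++ xs, ∀ b ∈ acc ++ xs, a ≠ b → bef a b = bef' a b) →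
      (acc ++ xs).Nodup →
      xs.foldl (fun acc x => PySem.List.insertBy bef x acc) acc
        = xs.foldl (fun acc x => PySem.List.insertBy bef' x acc) acc := by
  intro xs
  induction xs with
  | nil => intro acc _ _; rfl
  | cons x t ih =>
    intro acc h hnd
    have hxacc : x ∉ acc := by
      have := hnd
      rw [List.nodup_append] at this
      intro hx
      have hx' : x ∈ x :: t := by simp
      exact this.2.2 x hx x hx' rfl
    have hstep : PySem.List.insertBy bef x acc = PySem.List.insertBy bef' x acc := by
      apply pv_insertBy_congr
      intro y hy
      exact h x (by simp) y (by simp [hy]) (fun hxy => hxacc (hxy ▸ hy))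
    have hperm : (PySem.List.insertBy bef' x acc ++ t).Perm (acc ++ x :: t) := by
      have h1 : (PySem.List.insertBy bef' x acc).Perm (x :: acc) := pv_insertBy_perm _ _ _
      exact (h1.append_right t).trans List.perm_middle.symm
    simp only [List.foldl_cons]
    rw [hstep]
    apply ih
    · intro a ha b hb hab
      exact h a (hperm.mem_iff.mp ha) b (hperm.mem_iff.mp hb) hab
    · exact hperm.nodup_iff.mpr hnd

-- A's sorted(items): the first components are distinct keys, so the tuple sort is the key sort
theorem pv_sorted2_items (xs : List (String × List String)) (h : (xs.map Prod.fst).Nodup) :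
    PySem.List.sorted2 xs (fun p => p.1) (fun p => p.2) = PySem.List.sorted xs (fun p => p.1) := by
  have hinj : ∀ a ∈ xs, ∀ b ∈ xs, a.1 = b.1 → a = b := List.inj_on_of_nodup_map h
  have hnd : xs.Nodup := h.of_map
  rw [PySem.List.sorted_eq_foldl_insertBy]
  simp only [PySem.List.sorted2]
  apply pv_foldl_insertBy_congr
  · intro a ha b hb hab
    simp only [List.nil_append] at ha hb
    have hne : a.1 ≠ b.1 := fun hfst => hab (hinj a ha b hb hfst)
    rcases lt_trichotomy a.1 b.1 with hlt | heq | hgt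
    · simp [hlt, lt_asymm hlt]
    · exact absurd heq hne
    · simp [hgt, lt_asymm hgt]
  · simpa using hnd

-- B's sorted(keys, key=lambda m: (top(m), m)) is the sort by the lexicographic pair key
theorem pv_sorted2_keys (xs : List String) :
    PySem.List.sorted2 xs pvTop (fun m => m)
      = PySem.List.sorted xs (fun m => toLex (pvTop m, m)) := by
  rw [PySem.List.sorted_eq_foldl_insertBy]
  simp only [PySem.List.sorted2]
  have hbef : (fun a b => decide (pvTop a < pvTop b) || (!decide (pvTop b < pvTop a) && decide (a < b)))
      = (fun a b => decide ((toLex (pvTop a, a) : Lex (String × String)) < toLex (pvTop b, b))) := by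
    funext a b
    rcases lt_trichotomy (pvTop a) (pvTop b) with hlt | heq | hgt
    · simp [hlt, lt_asymm hlt, Prod.Lex.lt_iff]
    · simp [heq, Prod.Lex.lt_iff]
    · simp [hgt, lt_asymm hgt, ne_of_gt hgt, Prod.Lex.lt_iff]
  rw [hbef]
  rfl

-- concatenating, over the distinct key values, the elements with that key is a permutation
theorem pv_perm_flatMap_filter {α κ : Type} [BEq κ] [LawfulBEq κ] (k : α → κ) :
    ∀ (ts : List κ) (l : List α), ts.Nodup → (∀ m ∈ l, k m ∈ ts) →
    (ts.flatMap (fun c => l.filter (fun m => k m == c))).Perm l := by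
  intro ts
  induction ts with
  | nil =>
    intro l _ hcov
    cases l with
    | nil => simp
    | cons a t => exact absurd (hcov a (by simp)) (by simp)
  | cons c ts ih =>
    intro l hnd hcov
    rw [List.flatMap_cons]
    have hstep : ts.flatMap (fun c' => l.filter (fun m => k m == c'))
        = ts.flatMap (fun c' => (l.filter (fun m => !(k m == c))).filter (fun m => k m == c')) := by
      apply List.flatMap_congr
      intro c' hc'
      rw [List.filter_filter]
      apply List.filter_congr
      intro m _
      by_cases h : k m = c'
      · have hcc : c' ≠ c := by
          rintro rfl
          exact (List.nodup_cons.mp hnd).1 hc'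
        simp [h, hcc]
      · simp [h]
    have hper : (ts.flatMap (fun c' => l.filter (fun m => k m == c'))).Perm
        (l.filter (fun m => !(k m == c))) := by
      rw [hstep]
      apply ih
      · exact (List.nodup_cons.mp hnd).2
      · intro m hm
        have hml : m ∈ l := (List.mem_filter.mp hm).1
        have hmc : (!(k m == c)) = true := (List.mem_filter.mp hm).2
        have := hcov m hml
        simp only [List.mem_cons] at this
        rcases this with h | h
        · rw [h] at hmc; simp at hmc
        · exact h
    exact (List.Perm.append_left _ hper).trans (List.filter_append_perm _ l)

-- takeWhile/dropWhile on a block boundary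
theorem pv_takeWhile_block {α : Type} (p : α → Bool) :
    ∀ (a b : List α), (∀ x ∈ a, p x = true) → (∀ x ∈ b, p x = false) →
    (a ++ b).takeWhile p = a ∧ (a ++ b).dropWhile p = b := by
  intro a
  induction a with
  | nil =>
    intro b _ hb
    cases b with
    | nil => simp
    | cons y t => simp [hb y (by simp)]
  | cons x a ih =>
    intro b ha hb
    have hx : p x = true := ha x (by simp)
    have := ih b (fun y hy => ha y (by simp [hy])) hb
    simp [hx, this.1, this.2]

-- pvGroups on a concatenation of nonempty constant-key blocks with distinct keys
theorem pv_pvGroups_flatMap : ∀ (ts : List String) (B : String → List String),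
    ts.Nodup → (∀ c ∈ ts, B c ≠ []) → (∀ c ∈ ts, ∀ m ∈ B c, pvTop m = c) →
    pvGroups (ts.flatMap B) = ts.map (fun c => (c, B c)) := by
  intro ts
  induction ts with
  | nil => intro B _ _ _; simp [pvGroups]
  | cons c ts ih =>
    intro B hnd hne htop
    rw [List.flatMap_cons]
    obtain ⟨m, blk, hB⟩ : ∃ m blk, B c = m :: blk := by
      cases hBc : B c with
      | nil => exact absurd hBc (hne c (by simp))
      | cons m blk => exact ⟨m, blk, rfl⟩
    rw [hB, List.cons_append, pvGroups]
    have htopm : pvTop m = c := htop c (by simp) m (by simp [hB])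
    have hblk : ∀ x ∈ blk, (pvTop x == pvTop m) = true := by
      intro x hx
      simp [htopm, htop c (by simp) x (by simp [hB, hx])]
    have hrest : ∀ x ∈ ts.flatMap B, (pvTop x == pvTop m) = false := by
      intro x hx
      obtain ⟨c', hc', hxB⟩ := List.mem_flatMap.mp hx
      have hx' : pvTop x = c' := htop c' (by simp [hc']) x hxB
      have hne' : c' ≠ c := by
        rintro rfl
        exact (List.nodup_cons.mp hnd).1 hc'
      simp [hx', htopm, hne']
    obtain ⟨ht, hd⟩ := pv_takeWhile_block _ blk (ts.flatMap B) hblk hrest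
    rw [ht, hd, htopm,
      ih B (List.nodup_cons.mp hnd).2 (fun c' h => hne c' (by simp [h]))
        (fun c' h => htop c' (by simp [h]))]
    simp [hB]

-- ''.join lemmas
theorem pv_intercalate_nil_cons : ∀ (x : List Char) (ls : List (List Char)),
    List.intercalate [] (x :: ls) = x ++ List.intercalate [] ls := by
  intro x ls
  cases ls with
  | nil => simp [List.intercalate]
  | cons y t => simp [List.intercalate, List.intersperse]

theorem pv_join_nil : PySem.Str.join "" [] = "" := by
  rw [← String.toList_inj]
  simp [PySem.Str.toList_join, PySem.Chars.join, List.intercalate]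

theorem pv_join_cons (s : String) (ls : List String) :
    PySem.Str.join "" (s :: ls) = s ++ PySem.Str.join "" ls := by
  rw [← String.toList_inj]
  simp [PySem.Str.toList_join, String.toList_append, PySem.Chars.join, pv_intercalate_nil_cons]

theorem pv_join_append (l1 l2 : List String) :
    PySem.Str.join "" (l1 ++ l2) = PySem.Str.join "" l1 ++ PySem.Str.join "" l2 := by
  induction l1 with
  | nil => simp [pv_join_nil, String.empty_append]
  | cons x t ih => rw [List.cons_append, pv_join_cons, pv_join_cons, ih, String.append_assoc]

theorem pv_join_flatMap {α : Type} (f : α → List String) (l : List α) :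
    PySem.Str.join "" (l.flatMap f) = PySem.Str.join "" (l.map (fun x => PySem.Str.join "" (f x))) := by
  induction l with
  | nil => simp [pv_join_nil]
  | cons x t ih => rw [List.flatMap_cons, pv_join_append, List.map_cons, pv_join_cons, ih]

-- a string-appending loop is the join of the per-element pieces
theorem pv_foldl_append_join {α : Type} (g : α → String) :
    ∀ (l : List α) (acc : String),
      l.foldl (fun a x => a ++ g x) acc = acc ++ PySem.Str.join "" (l.map g) := by
  intro l
  induction l with
  | nil => intro acc; simp [pv_join_nil, String.append_empty]
  | cons x t ih =>
    intro acc
    simp only [List.foldl_cons, List.map_cons]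
    rw [ih, pv_join_cons, ← String.append_assoc]

-- both ports render the same (group, modules) list into the same markdown string
theorem pv_render (L : List (String × List String)) (groups : List (String × List String))
    (hsort : ∀ gp ∈ groups, PySem.List.sorted gp.2 (fun m => m) = gp.2) :
    List.foldl
      (fun acc gp =>
        List.foldl
            (fun acc m =>
              if pvLookup L m ≠ [] then
                acc ++ "* **" ++ m ++ "**\n" ++ "   * Depends on: " ++
                    PySem.Str.join ", " (PySem.List.sorted (pvLookup L m) fun x => x) ++
                  "\n"
              else acc ++ "* **" ++ m ++ "**\n")
            (acc ++ "**" ++ PySem.Str.upper gp.1 ++ ":**\n") (PySem.List.sorted gp.2 fun m => m) ++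
          "\n")
      "" groups
    = PySem.Str.join ""
      (List.flatMap
        (fun gp =>
          ("**" ++ PySem.Str.upper gp.1 ++ ":**\n") ::
            (List.flatMap
                (fun m =>
                  ("* **" ++ m ++ "**\n") ::
                    if pvLookup L m ≠ [] then
                      ["   * Depends on: " ++ PySem.Str.join ", " (PySem.List.sorted (pvLookup L m) fun x => x) ++ "\n"]
                    else [])
                gp.2 ++
              ["\n"]))
        groups) := by
  have hmod : (fun (acc m : String) =>
      if pvLookup L m ≠ [] then
        acc ++ "* **" ++ m ++ "**\n" ++ "   * Depends on: " ++
            PySem.Str.join ", " (PySem.List.sorted (pvLookup L m) fun x => x) ++ "\n"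
      else acc ++ "* **" ++ m ++ "**\n")
      = fun acc m => acc ++ PySem.Str.join ""
          (("* **" ++ m ++ "**\n") ::
            if pvLookup L m ≠ [] then
              ["   * Depends on: " ++ PySem.Str.join ", " (PySem.List.sorted (pvLookup L m) fun x => x) ++ "\n"]
            else []) := by
    funext acc m
    have hlit : ("**\n" : String) ++ "   * Depends on: " = "**\n   * Depends on: " := by
      rw [← String.toList_inj]; simp
    by_cases h : pvLookup L m ≠ []
    · simp [h, pv_join_cons, pv_join_nil, String.append_empty, String.append_assoc]
      rw [← hlit, String.append_assoc]
    · simp [h, pv_join_cons, pv_join_nil, String.append_empty, String.append_assoc]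
  have houter : (fun (acc : String) (gp : String × List String) =>
      List.foldl
          (fun acc m =>
            if pvLookup L m ≠ [] then
              acc ++ "* **" ++ m ++ "**\n" ++ "   * Depends on: " ++
                  PySem.Str.join ", " (PySem.List.sorted (pvLookup L m) fun x => x) ++
                "\n"
            else acc ++ "* **" ++ m ++ "**\n")
          (acc ++ "**" ++ PySem.Str.upper gp.1 ++ ":**\n") (PySem.List.sorted gp.2 fun m => m) ++
        "\n")
      = fun acc gp => acc ++
          ("**" ++ PySem.Str.upper gp.1 ++ ":**\n" ++
            PySem.Str.join "" ((PySem.List.sorted gp.2 fun m => m).map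
              (fun m => PySem.Str.join ""
                (("* **" ++ m ++ "**\n") ::
                  if pvLookup L m ≠ [] then
                    ["   * Depends on: " ++ PySem.Str.join ", " (PySem.List.sorted (pvLookup L m) fun x => x) ++ "\n"]
                  else []))) ++ "\n") := by
    funext acc gp
    rw [hmod, pv_foldl_append_join]
    simp [String.append_assoc]
  rw [houter, pv_foldl_append_join, String.empty_append, pv_join_flatMap]
  congr 1
  apply List.map_congr_left
  intro gp hgp
  rw [hsort gp hgp, pv_join_cons, pv_join_append, pv_join_cons, pv_join_nil, pv_join_flatMap]
  simp [String.append_assoc, String.append_empty]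

theorem format_dependency_map_spec : Claim_equal_format_dependency_map := by
  intro L _
  unfold Spec_format_dependency_map
  simp only [format_dependency_map, format_dependency_map_alt]
  have hbodyA : (fun (d : PySem.Dict String (List String)) (m : String) =>
      if 0 < ((PySem.Str.split? m ".").getD []).length then
        d.modify (((PySem.Str.split? m ".").getD []).headD "") [] fun l => l ++ [m]
      else d)
      = fun d m => d.modify (pvTop m) [] fun l => l ++ [m] := by
    funext d m
    rw [if_pos (List.length_pos_of_ne_nil (pv_parts_ne_nil m))]
    rfl
  rw [hbodyA]
  set S : List String := PySem.List.sorted (PySem.Set.ofList (List.map Prod.fst L)) (fun m => m) with hSdef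
  set grouped : PySem.Dict String (List String) :=
    List.foldl (fun d m => d.modify (pvTop m) [] fun l => l ++ [m]) PySem.Dict.empty S with hgdef
  set T : List String := PySem.Set.ofList (S.map pvTop) with hTdef
  set sT : List String := PySem.List.sorted T (fun c => c) with hsTdef
  have hS : S.Pairwise (· < ·) := by
    rw [hSdef]; exact PySem.List.sorted_ofList_pairwise_lt (List.map Prod.fst L)
  have hsT : sT.Pairwise (· < ·) := by
    rw [hsTdef, hTdef]; exact PySem.List.sorted_ofList_pairwise_lt (S.map pvTop)
  have hsTnd : sT.Nodup := hsT.imp ne_of_lt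
  have hsTperm : sT.Perm T := by
    rw [hsTdef]; exact PySem.List.sorted_perm T (fun c => c) false
  have hkeys : grouped.keys = T := by
    rw [hgdef, PySem.Dict.keys_foldl_modify_key S pvTop [] (fun _ x => fun l => l ++ [x]) PySem.Dict.empty,
      PySem.Dict.keys_empty, PySem.Set.update_nil_left, hTdef]
  have hknd : grouped.keys.Nodup := by
    rw [hgdef]
    exact PySem.Dict.nodup_keys_foldl_modify_key S pvTop [] (fun _ x => fun l => l ++ [x])
      PySem.Dict.empty PySem.Dict.nodup_keys_empty
  have hgetD : ∀ c, grouped.getD c [] = S.filter (fun m => pvTop m == c) := by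
    intro c
    rw [hgdef,
      show (List.foldl (fun d m => d.modify (pvTop m) [] fun l => l ++ [m]) PySem.Dict.empty S)
        = (List.foldl (fun d p => d.modify p.1 [] fun x => x ++ [p.2]) PySem.Dict.empty
            (S.map (fun m => (pvTop m, m)))) from
        (List.foldl_map (f := fun m => (pvTop m, m))
          (g := fun d p => d.modify p.1 [] fun x => x ++ [p.2])
          (l := S) (init := PySem.Dict.empty)).symm,
      PySem.Dict.getD_foldl_modify_append, PySem.Dict.getD_empty]
    simp [List.filter_map, List.map_map, Function.comp_def]
  have hitems : grouped.items = T.map (fun c => (c, S.filter (fun m => pvTop m == c))) := by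
    rw [PySem.Dict.items_eq_map_keys grouped hknd [], hkeys]
    exact List.map_congr_left (fun c _ => by rw [hgetD c])
  have hfst : (grouped.items.map (fun p => p.1)).Nodup := by
    have h : grouped.items.map (fun p => p.1) = grouped.keys := rfl
    rw [h]; exact hknd
  have hGA : PySem.List.sorted2 grouped.items (fun p => p.1) (fun p => p.2)
      = sT.map (fun c => (c, S.filter (fun m => pvTop m == c))) := by
    rw [pv_sorted2_items _ hfst]
    apply PySem.List.sorted_eq_of_perm_of_pairwise_lt
    · rw [hitems]; exact hsTperm.map _
    · rw [List.pairwise_map]; simpa using hsT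
  have hM : PySem.List.sorted2 (PySem.Set.ofList (List.map Prod.fst L)) pvTop (fun m => m)
      = sT.flatMap (fun c => S.filter (fun m => pvTop m == c)) := by
    rw [pv_sorted2_keys]
    apply PySem.List.sorted_eq_of_perm_of_pairwise_lt
    · have h1 : (sT.flatMap (fun c => S.filter (fun m => pvTop m == c))).Perm S := by
        apply pv_perm_flatMap_filter pvTop sT S hsTnd
        intro m hm
        rw [hsTdef, PySem.List.mem_sorted, hTdef, PySem.Set.mem_ofList]
        exact List.mem_map_of_mem hm
      have h2 : S.Perm (PySem.Set.ofList (List.map Prod.fst L)) := by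
        rw [hSdef]; exact PySem.List.sorted_perm _ _ _
      exact h1.trans h2
    · rw [List.pairwise_flatMap]
      constructor
      · intro c hc
        refine List.Pairwise.imp_of_mem ?_ ((hS.filter (fun m => pvTop m == c)))
        intro a b ha hb hab
        have hta : pvTop a = c := by simpa using (List.mem_filter.mp ha).2
        have htb : pvTop b = c := by simpa using (List.mem_filter.mp hb).2
        simp [Prod.Lex.lt_iff, hta, htb, hab]
      · refine List.Pairwise.imp ?_ hsT
        intro c1 c2 h12 x hx y hy
        have h1 : pvTop x = c1 := by simpa using (List.mem_filter.mp hx).2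
        have h2 : pvTop y = c2 := by simpa using (List.mem_filter.mp hy).2
        simp [Prod.Lex.lt_iff, h1, h2, h12]
  have hmemT : ∀ c ∈ sT, ∃ m ∈ S, pvTop m = c := by
    intro c hc
    have h1 : c ∈ T := hsTperm.subset hc
    rw [hTdef] at h1
    have h2 : c ∈ S.map pvTop := (PySem.Set.mem_ofList _ _).mp h1
    obtain ⟨m, hm, rfl⟩ := List.mem_map.mp h2
    exact ⟨m, hm, rfl⟩
  rw [hM, hGA,
    pv_pvGroups_flatMap sT (fun c => S.filter (fun m => pvTop m == c)) hsTnd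
      (fun c hc => by
        obtain ⟨m, hm, hmc⟩ := hmemT c hc
        exact List.ne_nil_of_mem (List.mem_filter.mpr ⟨hm, by simp [hmc]⟩))
      (fun c _ m hm => by simpa using (List.mem_filter.mp hm).2)]
  exact pv_render L _ (fun gp hgp => by
    obtain ⟨c, hc, rfl⟩ := List.mem_map.mp hgp
    exact PySem.List.sorted_eq_self_of_pairwise _ _ ((hS.filter _).imp le_of_lt))
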